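-- pv_equiv track=rewrite | github.com/smaterazzi/FlexEdgeAdminProd | webapp/fgt_parser.py | _parse_port_spec
-- ===== SOURCE A (Python) =====
-- def _parse_port_spec(port_str):
--     """Parse a FortiGate port specification.
--
--     Formats:
--       "53"        -> [(53, 53)]
--       "88 464"    -> [(88, 88), (464, 464)]
--       "67-68"     -> [(67, 68)]
--       "8000-8010" -> [(8000, 8010)]
--
--     Returns list of (min_port, max_port) tuples.
--     """
--     if not port_str:
--         return []
--
--     # Handle list of ports/ranges (space-separated already tokenized)
--     if isinstance(port_str, list):
--         result = []
--         for p in port_str: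
--             result.extend(_parse_port_spec(p))
--         return result
--
--     # Single port or range
--     port_str = str(port_str).strip()
--     if "-" in port_str:
--         parts = port_str.split("-", 1)
--         try:
--             return [(int(parts[0]), int(parts[1]))]
--         except ValueError:
--             return []
--     else:
--         try:
--             p = int(port_str)
--             return [(p, p)]
--         except ValueError:
--             return []
-- ===== SOURCE B (Python) =====
-- def _parse_port_spec(port_str):
--     """Parse a FortiGate port specification into (min_port, max_port) tuples.
--
--     B: iterative worklist instead of recursion for nested lists; the scalar
--     path locates the first '-' with str.find and slices instead of testing
--     membership and calling split."""
--     result = []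
--     stack = [port_str]
--     while stack:
--         item = stack.pop()
--         if isinstance(item, list):
--             stack.extend(reversed(item))
--             continue
--         if not item:
--             continue
--         s = str(item).strip()
--         i = s.find("-")
--         try:
--             if i < 0:
--                 p = int(s)
--                 result.append((p, p))
--             else:
--                 result.append((int(s[:i]), int(s[i + 1:])))
--         except ValueError:
--             pass
--     return result
-- ===== Notes on version B (the rewrite author's own statement) =====
-- stated objective: alternative
-- what changed: Recursion over nested lists is replaced by an explicit worklist stack, and the scalar parse uses str.find plus slicing instead of a '-' membership test followed by split('-', 1).
import Mathlib
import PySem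

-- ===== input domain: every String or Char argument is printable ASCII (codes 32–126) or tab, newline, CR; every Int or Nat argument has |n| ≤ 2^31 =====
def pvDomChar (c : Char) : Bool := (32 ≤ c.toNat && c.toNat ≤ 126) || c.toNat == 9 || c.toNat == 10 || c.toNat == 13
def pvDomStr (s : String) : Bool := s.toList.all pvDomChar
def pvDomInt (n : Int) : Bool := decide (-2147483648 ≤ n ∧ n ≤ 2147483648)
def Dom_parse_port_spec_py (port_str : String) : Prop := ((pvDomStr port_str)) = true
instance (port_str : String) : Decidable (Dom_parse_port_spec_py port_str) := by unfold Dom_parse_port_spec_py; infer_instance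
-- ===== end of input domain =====

-- B replaces A's recursion over nested lists by an explicit worklist stack and A's
-- membership-test + split('-',1) scalar parse by str.find + slicing; same return values
-- (the list branch of A is unreachable under the String signature).

-- ===== PORT A =====
def parse_port_spec_py (port_str : String) : List (Int × Int) :=
  if port_str = "" then []                       -- `if not port_str: return []`
  else
    let s := PySem.Str.strip port_str            -- `port_str = str(port_str).strip()` (str() is identity)
    if PySem.Str.isIn "-" s then                 -- `if "-" in port_str:`
      match PySem.Str.splitMax? s "-" 1 with     -- `parts = port_str.split("-", 1)` (sep ≠ "", never none)
      | none => []
      | some parts =>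
        match PySem.List.pyGet? parts 0, PySem.List.pyGet? parts 1 with
        | some p0, some p1 =>
          match PySem.Int.ofStr? p0, PySem.Int.ofStr? p1 with
          | some a, some b => [(a, b)]           -- `return [(int(parts[0]), int(parts[1]))]`
          | _, _ => []                           -- `except ValueError: return []`
        | _, _ => []                             -- unreachable: split("-",1) with "-" present has 2 parts
    else
      match PySem.Int.ofStr? s with              -- `p = int(port_str)`
      | some p => [(p, p)]                       -- `return [(p, p)]`
      | none => []                               -- `except ValueError: return []`

-- ===== PORT B =====
-- B's scalar parse: strip, locate the first '-' with find, slice around it (or parse whole)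
def pvScalarB (item : String) : List (Int × Int) :=
  if item = "" then []                           -- `if not item: continue`
  else
    let s := PySem.Str.strip item
    let i := PySem.Str.find s "-"
    if i < 0 then
      match PySem.Int.ofStr? s with
      | none => []
      | some p => [(p, p)]
    else
      match PySem.Int.ofStr? (PySem.Str.slice s none (some i)) with
      | none => []
      | some a =>
        match PySem.Int.ofStr? (PySem.Str.slice s (some (i + 1)) none) with
        | none => []
        | some b => [(a, b)]

-- B's while-loop over the worklist: on a String input the stack holds this single item
def parse_port_spec_py_alt (port_str : String) : List (Int × Int) :=
  List.foldl (fun out item => out ++ pvScalarB item) [] [port_str]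

-- ===== PRECONDITION & SPEC =====
def Spec_parse_port_spec_py (port_str : String) (out : List (Int × Int)) : Prop := out = parse_port_spec_py_alt port_str
instance (port_str : String) (out : List (Int × Int)) : Decidable (Spec_parse_port_spec_py port_str out) := by unfold Spec_parse_port_spec_py; infer_instance

-- ===== CLAIM (what is proved, stated in full; the proofs are below) =====
def Claim_equal_parse_port_spec_py : Prop := ∀ (port_str : String), Dom_parse_port_spec_py port_str → Spec_parse_port_spec_py port_str (parse_port_spec_py port_str)

-- ===== LEMMAS AND PROOFS =====

-- split worklist: with maxsplit exhausted (0 left) the rest of the list is one piece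
theorem pv_go_zero (fuel : Nat) (l cur : List Char) (acc : List (List Char)) :
    PySem.Chars.splitOnMax.go ['-'] fuel 0 l cur acc = ((cur.reverse ++ l) :: acc).reverse := by
  cases fuel with
  | zero => rfl
  | succ f => cases l with
    | nil => simp [PySem.Chars.splitOnMax.go]
    | cons c t => simp [PySem.Chars.splitOnMax.go]

-- with one split left, go splits at the first '-' (if any)
theorem pv_go_one (l : List Char) : ∀ (fuel : Nat) (cur : List Char) (acc : List (List Char)),
    l.length < fuel →
    PySem.Chars.splitOnMax.go ['-'] fuel 1 l cur acc =
      (if '-' ∈ l then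
        ((l.dropWhile (· != '-')).tail :: (cur.reverse ++ l.takeWhile (· != '-')) :: acc).reverse
      else ((cur.reverse ++ l) :: acc).reverse) := by
  induction l with
  | nil =>
    intro fuel cur acc h
    cases fuel with
    | zero => omega
    | succ f => simp [PySem.Chars.splitOnMax.go]
  | cons c t ih =>
    intro fuel cur acc h
    cases fuel with
    | zero => omega
    | succ f =>
      by_cases hc : c = '-'
      · subst hc
        simp [PySem.Chars.splitOnMax.go, List.isPrefixOf, pv_go_zero]
      · have hc' : ¬('-' = c) := fun h' => hc h'.symm
        have step : PySem.Chars.splitOnMax.go ['-'] (f+1) 1 (c :: t) cur acc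
            = PySem.Chars.splitOnMax.go ['-'] f 1 t (c :: cur) acc := by
          simp [PySem.Chars.splitOnMax.go, List.isPrefixOf, hc']
        rw [step, ih f (c :: cur) acc (by simpa using Nat.lt_of_succ_lt_succ h)]
        simp [hc, hc']

-- split("-", 1): one piece if no '-', otherwise the parts before and after the first '-'
theorem pv_splitOnMax_one (cs : List Char) :
    PySem.Chars.splitOnMax cs ['-'] 1 =
      (if '-' ∈ cs then [cs.takeWhile (· != '-'), (cs.dropWhile (· != '-')).tail] else [cs]) := by
  unfold PySem.Chars.splitOnMax
  rw [if_neg (by norm_num)]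
  show PySem.Chars.splitOnMax.go ['-'] (cs.length + 1) 1 cs [] [] = _
  rw [pv_go_one cs (cs.length + 1) [] [] (by omega)]
  by_cases h : '-' ∈ cs <;> simp [h]

-- find of a single character: index of the first occurrence, -1 if absent
theorem pv_find_go_char (l : List Char) : ∀ (k : Nat),
    PySem.Chars.find.go ['-'] l k =
      (if '-' ∈ l then ((k : Int) + (l.takeWhile (· != '-')).length) else -1) := by
  induction l with
  | nil => intro k; simp [PySem.Chars.find.go]
  | cons c t ih =>
    intro k
    by_cases hc : c = '-'
    · subst hc; simp [PySem.Chars.find.go, List.isPrefixOf]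
    · have hc' : ¬('-' = c) := fun h' => hc h'.symm
      have step : PySem.Chars.find.go ['-'] (c :: t) k = PySem.Chars.find.go ['-'] t (k + 1) := by
        simp [PySem.Chars.find.go, List.isPrefixOf, hc']
      rw [step, ih (k + 1)]
      by_cases h : '-' ∈ t <;> simp [hc, hc', h]
      omega

-- singleton infix is membership
theorem pv_singleton_infix (c : Char) (l : List Char) : [c] <:+: l ↔ c ∈ l := by
  constructor
  · intro h; exact (List.singleton_sublist).1 h.sublist
  · intro h
    obtain ⟨s, t, rfl⟩ := List.append_of_mem h
    exact ⟨s, t, by simp⟩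

-- taking the length of the takeWhile-prefix recovers it
theorem pv_take_takeWhile (l : List Char) (p : Char → Bool) :
    List.take (List.takeWhile p l).length l = List.takeWhile p l := by
  set w := List.takeWhile p l with hw
  obtain ⟨t, ht⟩ := List.takeWhile_prefix (l := l) p
  rw [← hw] at ht
  rw [← ht, List.take_left]

-- dropping one past the takeWhile-prefix is the tail of the dropWhile-suffix
theorem pv_drop_succ_takeWhile (l : List Char) (p : Char → Bool) :
    List.drop ((List.takeWhile p l).length + 1) l = (List.dropWhile p l).tail := by
  set w := List.takeWhile p l with hw
  set d := List.dropWhile p l with hd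
  have h : w ++ d = l := by rw [hw, hd]; exact List.takeWhile_append_dropWhile
  rw [← h, List.drop_append]
  simp

-- ===== VERDICT (by name: the statement is the Claim_ definition above) =====
set_option maxHeartbeats 1000000 in
theorem parse_port_spec_py_spec : Claim_equal_parse_port_spec_py := by
  intro port_str _
  unfold Spec_parse_port_spec_py
  have hB : parse_port_spec_py_alt port_str = pvScalarB port_str := by
    simp [parse_port_spec_py_alt]
  rw [hB]
  unfold parse_port_spec_py pvScalarB
  dsimp only
  by_cases he : port_str = ""
  · rw [if_pos he, if_pos he]
  · rw [if_neg he, if_neg he]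
    set s := PySem.Str.strip port_str with hs
    by_cases hm : '-' ∈ s.toList
    · -- A takes the split branch, B the slice branch
      set T := s.toList.takeWhile (· != '-') with hT
      set D := (s.toList.dropWhile (· != '-')).tail with hD
      have hin : PySem.Str.isIn "-" s = true := by
        rw [PySem.Str.isIn_iff_infix]
        exact (pv_singleton_infix '-' s.toList).2 hm
      have hfind : PySem.Str.find s "-" = (T.length : Int) := by
        show PySem.Chars.find s.toList ['-'] = _
        unfold PySem.Chars.find
        rw [pv_find_go_char s.toList 0]
        simp [hm, hT]
      have hsplit : PySem.Str.splitMax? s "-" 1 = some [String.ofList T, String.ofList D] := by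
        unfold PySem.Str.splitMax? PySem.Chars.splitMax?
        rw [if_neg (by decide)]
        rw [show ("-" : String).toList = ['-'] from rfl, pv_splitOnMax_one, if_pos hm]
        rfl
      have hslice1 : PySem.Str.slice s none (some (T.length : Int)) = String.ofList T := by
        unfold PySem.Str.slice PySem.Chars.slice
        rw [PySem.List.slice_to s.toList (by omega)]
        rw [Int.toNat_natCast, hT, pv_take_takeWhile]
      have hslice2 : PySem.Str.slice s (some ((T.length : Int) + 1)) none = String.ofList D := by
        unfold PySem.Str.slice PySem.Chars.slice
        rw [PySem.List.slice_from s.toList (by omega)]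
        rw [show ((T.length : Int) + 1).toNat = T.length + 1 by omega]
        rw [hT, hD, pv_drop_succ_takeWhile]
      rw [if_pos hin, hsplit, hfind, if_neg (by omega : ¬ ((T.length : Int) < 0)),
          hslice1, hslice2]
      cases h1 : PySem.Int.ofStr? (String.ofList T) <;>
        cases h2 : PySem.Int.ofStr? (String.ofList D) <;>
          simp [PySem.List.pyGet?, PySem.List.pyIdx?, h1, h2]
    · -- no '-': A parses s whole; B's find is -1
      have hin : ¬ (PySem.Str.isIn "-" s = true) := by
        rw [PySem.Str.isIn_iff_infix]
        exact fun h => hm ((pv_singleton_infix '-' s.toList).1 h)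
      have hfind : PySem.Str.find s "-" = -1 := by
        show PySem.Chars.find s.toList ['-'] = _
        unfold PySem.Chars.find
        rw [pv_find_go_char s.toList 0]
        simp [hm]
      rw [if_neg hin, hfind, if_pos (by norm_num : (-1 : Int) < 0)]
      cases PySem.Int.ofStr? s <;> rfl
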